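-- pv_equiv track=rewrite | github.com/mlei06/Clinical-Deidentification-Playground | src/clinical_deid/analytics/stats.py | _order_split_count_keys
-- ===== SOURCE A (Python) =====
-- UNSPLIT_BUCKET = "(none)"
--
-- def _order_split_count_keys(counts: dict[str, int]) -> dict[str, int]:
--     """Stable display order: known splits first, then other names, ``(none)`` last."""
--     preferred = ("train", "valid", "dev", "test", "deploy")
--     out: dict[str, int] = {}
--     for k in preferred:
--         if k in counts:
--             out[k] = counts[k]
--     for k in sorted(x for x in counts if x not in preferred and x != UNSPLIT_BUCKET):
--         out[k] = counts[k]
--     if UNSPLIT_BUCKET in counts: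
--         out[UNSPLIT_BUCKET] = counts[UNSPLIT_BUCKET]
--     return out
-- ===== SOURCE B (Python) =====
-- UNSPLIT_BUCKET = "(none)"
--
-- def _order_split_count_keys(counts: dict[str, int]) -> dict[str, int]:
--     """Stable display order: known splits first, then other names, ``(none)`` last."""
--     preferred = ("train", "valid", "dev", "test", "deploy")
--
--     def sort_key(k: str) -> str:
--         if k == UNSPLIT_BUCKET:
--             rank = 7
--         elif k in preferred:
--             rank = preferred.index(k)
--         else:
--             rank = 6
--         return chr(48 + rank) + k
--
--     return {k: counts[k] for k in sorted(counts, key=sort_key)}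
-- ===== Notes on version B (the rewrite author's own statement) =====
-- stated objective: simpler
-- what changed: A builds the ordered dict in three explicit phases (preferred loop, sorted() over the remaining names, trailing '(none)' check); B does one sorted() over all keys with a composite rank-prefix key (chr(48+rank)+k) and a single dict comprehension.
import Mathlib
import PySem

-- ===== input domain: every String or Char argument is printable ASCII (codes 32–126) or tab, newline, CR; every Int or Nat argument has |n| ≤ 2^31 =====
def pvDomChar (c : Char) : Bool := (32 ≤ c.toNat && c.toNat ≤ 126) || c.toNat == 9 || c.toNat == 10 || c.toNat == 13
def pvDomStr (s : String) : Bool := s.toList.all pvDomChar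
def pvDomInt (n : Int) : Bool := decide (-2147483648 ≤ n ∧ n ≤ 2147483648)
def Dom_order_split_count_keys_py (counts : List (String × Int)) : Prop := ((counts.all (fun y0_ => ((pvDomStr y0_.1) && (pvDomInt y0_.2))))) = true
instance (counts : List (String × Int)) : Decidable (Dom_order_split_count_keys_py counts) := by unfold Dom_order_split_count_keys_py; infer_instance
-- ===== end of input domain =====

-- B replaces A's three explicit output-building phases by ONE sort of all keys under a composite
-- rank-prefix key (objective: simpler — a single sorted() plus a dict comprehension).

-- ===== PORT A =====
-- Python's string sort order (sorted with no key) is lexicographic by code point, which is exactly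
-- the lexicographic order on `String.toList`; we sort with that key because it is kernel-computable.
-- `counts[k]` inside the loops is ported as `getD k 0`: every looked-up key is present, so the
-- KeyError branch is unreachable.
def order_split_count_keys_py (counts : List (String × Int)) : List (String × Int) :=
  let preferred : List String := ["train", "valid", "dev", "test", "deploy"]
  let d : PySem.Dict String Int := PySem.Dict.mk counts
  let out : PySem.Dict String Int :=
    preferred.foldl (fun out k => if d.contains k then out.insert k (d.getD k 0) else out)
      PySem.Dict.empty
  let out :=
    (PySem.List.sorted (d.keys.filter fun x => !preferred.contains x && !(x == "(none)"))
        (fun x => x.toList) false).foldl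
      (fun out k => out.insert k (d.getD k 0)) out
  let out := if d.contains "(none)" then out.insert "(none)" (d.getD "(none)" 0) else out
  out.items

-- ===== PORT B =====
-- `chr(48 + rank) + k` from Source B: one prefix character (codes 48–55) followed by the key's
-- characters; comparing these lists lexicographically is exactly Python's string comparison.
def pvSortKey (k : String) : List Char :=
  let preferred : List String := ["train", "valid", "dev", "test", "deploy"]
  let rank : Nat :=
    if k == "(none)" then 7
    else if preferred.contains k then (PySem.List.index? preferred k).getD 0
    else 6
  Char.ofNat (48 + rank) :: k.toList

def order_split_count_keys_py_alt (counts : List (String × Int)) : List (String × Int) :=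
  let d : PySem.Dict String Int := PySem.Dict.mk counts
  ((PySem.List.sorted d.keys pvSortKey false).foldl
      (fun out k => out.insert k (d.getD k 0)) PySem.Dict.empty).items

-- ===== PRECONDITION & SPEC =====
-- Pre_ excludes association lists with duplicate keys: they do not represent any Python dict
-- (the dict argument collapses duplicates, last value winning, while the association-list
-- convention reads the first match), so A's behaviour there is not defined by the Python source.
def Pre_order_split_count_keys_py (counts : List (String × Int)) : Prop :=
  (counts.map Prod.fst).Nodup
instance (counts : List (String × Int)) : Decidable (Pre_order_split_count_keys_py counts) := by
  unfold Pre_order_split_count_keys_py; infer_instance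

def pvWitness_order_split_count_keys_py : (List (String × Int)) :=
  [("zeta", 4), ("test", 3), ("(none)", 2), ("train", 1)]

def Spec_order_split_count_keys_py (counts : List (String × Int)) (out : List (String × Int)) : Prop := out = order_split_count_keys_py_alt counts
instance (counts : List (String × Int)) (out : List (String × Int)) : Decidable (Spec_order_split_count_keys_py counts out) := by unfold Spec_order_split_count_keys_py; infer_instance

-- ===== CLAIM (what is proved, stated in full; the proofs are below) =====
def Claim_equal_order_split_count_keys_py : Prop := ∀ (counts : List (String × Int)), Dom_order_split_count_keys_py counts → Pre_order_split_count_keys_py counts → Spec_order_split_count_keys_py counts (order_split_count_keys_py counts)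

-- ===== LEMMAS AND PROOFS =====

-- pvSortKey on a non-preferred, non-"(none)" key
theorem key_other {a : String} (hp : a ∉ (["train","valid","dev","test","deploy"] : List String))
    (hn : a ≠ "(none)") : pvSortKey a = '6' :: a.toList := by
  simp only [List.mem_cons, not_or] at hp
  simp [pvSortKey, hn, hp.1, hp.2.1, hp.2.2.1, hp.2.2.2.1, hp.2.2.2.2]

theorem key_none : pvSortKey "(none)" = '7' :: "(none)".toList := by decide

theorem other_lt_other {a b : String}
    (hpa : a ∉ (["train","valid","dev","test","deploy"] : List String)) (hna : a ≠ "(none)")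
    (hpb : b ∉ (["train","valid","dev","test","deploy"] : List String)) (hnb : b ≠ "(none)")
    (h : a.toList < b.toList) : pvSortKey a < pvSortKey b := by
  rw [key_other hpa hna, key_other hpb hnb]
  exact List.cons_lt_cons_iff.mpr (Or.inr ⟨rfl, h⟩)

theorem pref_lt_other {a b : String}
    (hpa : a ∈ (["train","valid","dev","test","deploy"] : List String))
    (hpb : b ∉ (["train","valid","dev","test","deploy"] : List String)) (hnb : b ≠ "(none)") :
    pvSortKey a < pvSortKey b := by
  rw [key_other hpb hnb]
  simp only [List.mem_cons, List.not_mem_nil, or_false] at hpa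
  rcases hpa with h | h | h | h | h
  all_goals (subst h; exact List.cons_lt_cons_iff.mpr (Or.inl (by decide)))

theorem pref_lt_none {a : String}
    (hpa : a ∈ (["train","valid","dev","test","deploy"] : List String)) :
    pvSortKey a < pvSortKey "(none)" := by
  rw [key_none]
  simp only [List.mem_cons, List.not_mem_nil, or_false] at hpa
  rcases hpa with h | h | h | h | h
  all_goals (subst h; exact List.cons_lt_cons_iff.mpr (Or.inl (by decide)))

theorem other_lt_none {a : String}
    (hpa : a ∉ (["train","valid","dev","test","deploy"] : List String)) (hna : a ≠ "(none)") :
    pvSortKey a < pvSortKey "(none)" := by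
  rw [key_other hpa hna, key_none]
  exact List.cons_lt_cons_iff.mpr (Or.inl (by decide))

-- proof-only abbreviations: the three segments of the output's key order and the common pair-builder
def pvD (counts : List (String × Int)) : PySem.Dict String Int := PySem.Dict.mk counts
def pvF (counts : List (String × Int)) : String → String × Int := fun k => (k, (pvD counts).getD k 0)
def pvP (counts : List (String × Int)) : List String :=
  ["train","valid","dev","test","deploy"].filter (fun k => (pvD counts).contains k)
def pvO (counts : List (String × Int)) : List String :=
  PySem.List.sorted ((counts.map Prod.fst).filter
    (fun x => !(["train","valid","dev","test","deploy"] : List String).contains x && !(x == "(none)")))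
    (fun x => x.toList) false
def pvN (counts : List (String × Int)) : List String :=
  if (pvD counts).contains "(none)" then ["(none)"] else []

theorem pvD_keys (counts : List (String × Int)) : (pvD counts).keys = counts.map Prod.fst := by
  simp [pvD, PySem.Dict.keys]

theorem pvD_contains (counts : List (String × Int)) (k : String) :
    (pvD counts).contains k = decide (k ∈ counts.map Prod.fst) := by
  rw [PySem.Dict.contains_eq_decide_mem_keys, pvD_keys]

theorem pvP_nodup (counts : List (String × Int)) : (pvP counts).Nodup :=
  List.Nodup.filter _ (by decide)

theorem pvP_mem {counts : List (String × Int)} {a : String} (ha : a ∈ pvP counts) :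
    a ∈ (["train","valid","dev","test","deploy"] : List String) :=
  (List.mem_filter.mp ha).1

theorem pvO_mem {counts : List (String × Int)} {a : String} (ha : a ∈ pvO counts) :
    a ∉ (["train","valid","dev","test","deploy"] : List String) ∧ a ≠ "(none)" := by
  have h := (List.mem_filter.mp ((PySem.List.sorted_perm _ _ _).mem_iff.mp ha)).2
  simp only [Bool.and_eq_true, Bool.not_eq_true'] at h
  constructor
  · intro hmem
    have hc : List.contains ["train","valid","dev","test","deploy"] a = true := by
      simpa using List.elem_eq_true_of_mem hmem
    rw [hc] at h; simp at h
  · intro he; subst he; simp at h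

theorem pvO_nodup {counts : List (String × Int)} (hpre : (counts.map Prod.fst).Nodup) :
    (pvO counts).Nodup :=
  (PySem.List.sorted_perm _ _ _).nodup_iff.mpr (hpre.filter _)

-- A's port returns exactly the three concatenated segments, each key paired with its count
theorem A_items (counts : List (String × Int)) (hpre : (counts.map Prod.fst).Nodup) :
    order_split_count_keys_py counts = (pvP counts ++ pvO counts ++ pvN counts).map (pvF counts) := by
  have hkeys : (PySem.Dict.mk counts).keys = counts.map Prod.fst := by simp [PySem.Dict.keys]
  simp only [order_split_count_keys_py, hkeys]
  have h1 : List.foldl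
      (fun (out : PySem.Dict String Int) k =>
        if (PySem.Dict.mk counts).contains k = true then out.insert k ((PySem.Dict.mk counts).getD k 0) else out)
      PySem.Dict.empty ["train","valid","dev","test","deploy"]
      = List.foldl (fun (out : PySem.Dict String Int) k => out.insert k ((PySem.Dict.mk counts).getD k 0))
        PySem.Dict.empty (pvP counts) := by
    rw [pvP, pvD]
    exact PySem.List.foldl_if_eq_foldl_filter _ _ _ _
  rw [h1]
  have h1items : (List.foldl (fun (out : PySem.Dict String Int) k => out.insert k ((PySem.Dict.mk counts).getD k 0))
      PySem.Dict.empty (pvP counts)).items = (pvP counts).map (pvF counts) := by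
    have h := PySem.Dict.items_foldl_insert_fresh (pvP counts) (fun a => a)
      (fun a => (PySem.Dict.mk counts).getD a 0) PySem.Dict.empty (fun a _ => by simp)
      (by simpa using pvP_nodup counts)
    simpa [pvF, pvD] using h
  have h1contains : ∀ a : String, (List.foldl
      (fun (out : PySem.Dict String Int) k => out.insert k ((PySem.Dict.mk counts).getD k 0))
      PySem.Dict.empty (pvP counts)).contains a = decide (a ∈ pvP counts) := by
    intro a
    rw [PySem.Dict.contains_eq_decide_mem_keys]
    have : (List.foldl (fun (out : PySem.Dict String Int) k => out.insert k ((PySem.Dict.mk counts).getD k 0))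
        PySem.Dict.empty (pvP counts)).keys = pvP counts := by
      simp [PySem.Dict.keys, h1items, pvF, Function.comp_def]
    rw [this]
  have hOdef : PySem.List.sorted
      (List.filter (fun x => !(["train","valid","dev","test","deploy"] : List String).contains x && !(x == "(none)"))
        (counts.map Prod.fst)) (fun x => x.toList) false = pvO counts := rfl
  rw [hOdef]
  have h2items : (List.foldl (fun (out : PySem.Dict String Int) k => out.insert k ((PySem.Dict.mk counts).getD k 0))
      (List.foldl (fun (out : PySem.Dict String Int) k => out.insert k ((PySem.Dict.mk counts).getD k 0))
        PySem.Dict.empty (pvP counts)) (pvO counts)).items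
      = (pvP counts).map (pvF counts) ++ (pvO counts).map (pvF counts) := by
    have h := PySem.Dict.items_foldl_insert_fresh (pvO counts) (fun a => a)
      (fun a => (PySem.Dict.mk counts).getD a 0)
      (List.foldl (fun (out : PySem.Dict String Int) k => out.insert k ((PySem.Dict.mk counts).getD k 0))
        PySem.Dict.empty (pvP counts))
      (fun a ha => by
        rw [h1contains]
        simpa using fun hmem => (pvO_mem ha).1 (pvP_mem hmem))
      (by simpa using pvO_nodup hpre)
    simpa [pvF, pvD, h1items] using h
  have h2contains : (List.foldl (fun (out : PySem.Dict String Int) k => out.insert k ((PySem.Dict.mk counts).getD k 0))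
      (List.foldl (fun (out : PySem.Dict String Int) k => out.insert k ((PySem.Dict.mk counts).getD k 0))
        PySem.Dict.empty (pvP counts)) (pvO counts)).contains "(none)" = false := by
    rw [PySem.Dict.contains_eq_decide_mem_keys]
    have hk2 : (List.foldl (fun (out : PySem.Dict String Int) k => out.insert k ((PySem.Dict.mk counts).getD k 0))
        (List.foldl (fun (out : PySem.Dict String Int) k => out.insert k ((PySem.Dict.mk counts).getD k 0))
          PySem.Dict.empty (pvP counts)) (pvO counts)).keys = pvP counts ++ pvO counts := by
      simp [PySem.Dict.keys, h2items, pvF, Function.comp_def]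
    rw [hk2]
    simp only [decide_eq_false_iff_not, List.mem_append, not_or]
    exact ⟨fun h => (by decide : "(none)" ∉ (["train","valid","dev","test","deploy"] : List String)) (pvP_mem h),
           fun h => (pvO_mem h).2 rfl⟩
  by_cases hc : (PySem.Dict.mk counts).contains "(none)" = true
  · rw [if_pos hc, PySem.Dict.items_insert_of_not_contains _ _ h2contains, h2items]
    have hN : pvN counts = ["(none)"] := by rw [pvN]; rw [pvD]; rw [if_pos hc]
    rw [hN]
    simp [pvF, pvD]
  · rw [if_neg hc, h2items]
    have hN : pvN counts = [] := by rw [pvN]; rw [pvD]; rw [if_neg hc]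
    rw [hN]
    simp

-- the single sorted key list of B is exactly the three segments of A
theorem PON_perm (counts : List (String × Int)) (hpre : (counts.map Prod.fst).Nodup) :
    (pvP counts ++ pvO counts ++ pvN counts).Perm (counts.map Prod.fst) := by
  have pP : (pvP counts).Perm ((counts.map Prod.fst).filter
      (fun k => (["train","valid","dev","test","deploy"] : List String).contains k)) := by
    refine (List.perm_ext_iff_of_nodup (pvP_nodup counts) (hpre.filter _)).mpr ?_
    intro a
    simp only [pvP, List.mem_filter, pvD_contains]
    simp [and_comm]
  have pO : (pvO counts).Perm ((counts.map Prod.fst).filter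
      (fun x => !(["train","valid","dev","test","deploy"] : List String).contains x && !(x == "(none)"))) :=
    PySem.List.sorted_perm _ _ _
  have pN : (pvN counts).Perm ((counts.map Prod.fst).filter
      (fun x => !(["train","valid","dev","test","deploy"] : List String).contains x && (x == "(none)"))) := by
    have hfe : (counts.map Prod.fst).filter
        (fun x => !(["train","valid","dev","test","deploy"] : List String).contains x && (x == "(none)"))
        = (counts.map Prod.fst).filter (fun x => x == "(none)") := by
      apply List.filter_congr
      intro x _
      by_cases hx : x = "(none)"
      · subst hx; decide
      · simp [hx]
    rw [hfe, List.filter_beq]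
    by_cases hc : "(none)" ∈ counts.map Prod.fst
    · rw [List.count_eq_one_of_mem hpre hc]
      have : pvN counts = ["(none)"] := by
        rw [pvN, pvD_contains]; simp [hc]
      rw [this]; rfl
    · rw [List.count_eq_zero_of_not_mem hc]
      have : pvN counts = [] := by
        rw [pvN, pvD_contains]; simp [hc]
      rw [this]; rfl
  have split2 : ((counts.map Prod.fst).filter
        (fun x => !(["train","valid","dev","test","deploy"] : List String).contains x && !(x == "(none)"))
      ++ (counts.map Prod.fst).filter
        (fun x => !(["train","valid","dev","test","deploy"] : List String).contains x && (x == "(none)"))).Perm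
      ((counts.map Prod.fst).filter
        (fun x => !(["train","valid","dev","test","deploy"] : List String).contains x)) := by
    have h := List.filter_append_perm (fun x => !(x == "(none)"))
      ((counts.map Prod.fst).filter
        (fun x => !(["train","valid","dev","test","deploy"] : List String).contains x))
    rw [List.filter_filter, List.filter_filter] at h
    refine List.Perm.trans ?_ h
    apply List.Perm.append
    · apply List.Perm.of_eq; apply List.filter_congr; intro x _; simp [Bool.and_comm]
    · apply List.Perm.of_eq; apply List.filter_congr; intro x _; simp [Bool.and_comm]
  have split1 : ((counts.map Prod.fst).filter
        (fun k => (["train","valid","dev","test","deploy"] : List String).contains k)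
      ++ (counts.map Prod.fst).filter
        (fun x => !(["train","valid","dev","test","deploy"] : List String).contains x)).Perm
      (counts.map Prod.fst) := List.filter_append_perm _ _
  refine List.Perm.trans ?_ split1
  rw [List.append_assoc]
  exact List.Perm.append pP ((pO.append pN).trans split2)

theorem PON_pairwise (counts : List (String × Int)) (hpre : (counts.map Prod.fst).Nodup) :
    (pvP counts ++ pvO counts ++ pvN counts).Pairwise (fun a b => pvSortKey a < pvSortKey b) := by
  rw [List.append_assoc, List.pairwise_append]
  refine ⟨?_, ?_, ?_⟩
  · rw [pvP]
    exact List.Pairwise.sublist List.filter_sublist (by decide)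
  · rw [List.pairwise_append]
    refine ⟨?_, ?_, ?_⟩
    · have e : pvO counts = @PySem.List.sorted _ _ List.instLinearOrder.toLT LinearOrder.toDecidableLT
          ((counts.map Prod.fst).filter
            (fun x => !(["train","valid","dev","test","deploy"] : List String).contains x && !(x == "(none)")))
          (fun x => x.toList) false := by rw [pvO]; congr 1
      have hle : (pvO counts).Pairwise (fun a b => a.toList ≤ b.toList) := by
        rw [e]; exact PySem.List.sorted_pairwise _ _
      have hne : (pvO counts).Pairwise (fun a b => a ≠ b) := pvO_nodup hpre
      refine (hle.and hne).imp_of_mem ?_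
      intro a b ha hb hab
      refine other_lt_other (pvO_mem ha).1 (pvO_mem ha).2 (pvO_mem hb).1 (pvO_mem hb).2
        (lt_of_le_of_ne hab.1 fun hEq => hab.2 ?_)
      have := congrArg String.ofList hEq
      simpa using this
    · rw [pvN]; split <;> simp
    · intro a ha b hb
      rw [pvN] at hb
      split at hb
      · rw [List.mem_singleton] at hb; subst hb
        exact other_lt_none (pvO_mem ha).1 (pvO_mem ha).2
      · exact absurd hb (List.not_mem_nil)
  · intro a ha b hb
    rcases List.mem_append.mp hb with hbO | hbN
    · exact pref_lt_other (pvP_mem ha) (pvO_mem hbO).1 (pvO_mem hbO).2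
    · rw [pvN] at hbN
      split at hbN
      · rw [List.mem_singleton] at hbN; subst hbN
        exact pref_lt_none (pvP_mem ha)
      · exact absurd hbN (List.not_mem_nil)

theorem B_items (counts : List (String × Int)) (hpre : (counts.map Prod.fst).Nodup) :
    order_split_count_keys_py_alt counts = (pvP counts ++ pvO counts ++ pvN counts).map (pvF counts) := by
  have hkeys : (PySem.Dict.mk counts).keys = counts.map Prod.fst := by simp [PySem.Dict.keys]
  simp only [order_split_count_keys_py_alt, hkeys]
  have hsorted : PySem.List.sorted (counts.map Prod.fst) pvSortKey false
      = pvP counts ++ pvO counts ++ pvN counts := by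
    have h := PySem.List.sorted_eq_of_perm_of_pairwise_lt (counts.map Prod.fst)
      (pvP counts ++ pvO counts ++ pvN counts) pvSortKey (PON_perm counts hpre)
      (PON_pairwise counts hpre)
    rw [← h]
    congr 1
  rw [hsorted]
  have h := PySem.Dict.items_foldl_insert_fresh (pvP counts ++ pvO counts ++ pvN counts) (fun a => a)
    (fun a => (PySem.Dict.mk counts).getD a 0) PySem.Dict.empty (fun a _ => by simp)
    (by simpa using (PON_perm counts hpre).nodup_iff.mpr hpre)
  simpa [pvF, pvD] using h

theorem main_eq (counts : List (String × Int))
    (hpre : Pre_order_split_count_keys_py counts) :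
    order_split_count_keys_py counts = order_split_count_keys_py_alt counts := by
  unfold Pre_order_split_count_keys_py at hpre
  rw [A_items counts hpre, B_items counts hpre]

-- ===== VERDICT (by name: the statement is the Claim_ definition above) =====
theorem order_split_count_keys_py_spec : Claim_equal_order_split_count_keys_py := by
  intro counts _ hpre
  unfold Spec_order_split_count_keys_py
  exact main_eq counts hpre
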